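-- pv_equiv track=rewrite | github.com/trevor-nichols/openai-agents-saas-starter | apps/api-service/src/app/infrastructure/providers/openai/memory/strategy.py | _group_by_turns
-- ===== SOURCE A (Python) =====
-- from collections.abc import Awaitable, Callable, Iterable, Mapping, Sequence
-- from typing import Any, Literal, cast, overload
--
-- def _is_user(item: Mapping[str, Any]) -> bool:
--     role = (item.get("role") or "").lower()
--     if role == "user":
--         return True
--     message_type = (item.get("messageType") or item.get("type") or "").lower()
--     return message_type == "user"
--
-- def _group_by_turns(items: Sequence[Mapping[str, Any]]) -> list[list[int]]:
--     """Return list of index lists, one per user-anchored turn."""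
--
--     turns: list[list[int]] = []
--     current: list[int] = []
--     for idx, item in enumerate(items):
--         if _is_user(item):
--             if current:
--                 turns.append(current)
--             current = [idx]
--         else:
--             current.append(idx)
--     if current:
--         turns.append(current)
--     return turns
-- ===== SOURCE B (Python) =====
-- def _is_user(item):
--     role = (item.get("role") or "").lower()
--     if role == "user":
--         return True
--     message_type = (item.get("messageType") or item.get("type") or "").lower()
--     return message_type == "user"
--
--
-- def _group_by_turns(items):
--     """Return list of index lists, one per user-anchored turn."""
--     n = len(items)
--     anchors = [i for i, it in enumerate(items) if _is_user(it)]
--     if not anchors: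
--         return [list(range(n))] if n else []
--     bounds = ([0] if anchors[0] > 0 else []) + anchors + [n]
--     return [list(range(a, b)) for a, b in zip(bounds, bounds[1:])]
-- ===== Notes on version B (the rewrite author's own statement) =====
-- stated objective: alternative
-- what changed: B first collects the user-anchor indices in one comprehension, then materializes each turn as an explicit index range between consecutive boundaries, instead of A's streaming accumulation of a 'current' list that is flushed on each user item.
import Mathlib
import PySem

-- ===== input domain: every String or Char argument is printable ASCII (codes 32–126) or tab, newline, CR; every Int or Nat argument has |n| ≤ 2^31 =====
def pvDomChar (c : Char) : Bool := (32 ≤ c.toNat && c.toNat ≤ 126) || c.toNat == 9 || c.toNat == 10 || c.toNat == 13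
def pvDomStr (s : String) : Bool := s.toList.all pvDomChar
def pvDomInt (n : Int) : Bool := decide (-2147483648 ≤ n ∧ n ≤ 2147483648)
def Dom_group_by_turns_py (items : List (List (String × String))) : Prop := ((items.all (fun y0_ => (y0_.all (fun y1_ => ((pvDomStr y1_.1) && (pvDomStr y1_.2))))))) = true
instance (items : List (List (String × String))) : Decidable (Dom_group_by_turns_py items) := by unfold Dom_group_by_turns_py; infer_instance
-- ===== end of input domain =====

-- B computes the turn boundaries (user-anchor indices) first and then emits index
-- ranges between consecutive boundaries, instead of A's streaming current-list pass;
-- same asymptotic cost, different decomposition.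

-- ===== PORT A =====
-- shared helper: Python _is_user (used verbatim by both A and B)
def pv_is_user (item : List (String × String)) : Bool :=
  let role := PySem.Str.lower (((PySem.Dict.mk item).get? "role").getD "")
  if role == "user" then true
  else
    let mt0 := ((PySem.Dict.mk item).get? "messageType").getD ""
    let mt1 := if mt0 == "" then ((PySem.Dict.mk item).get? "type").getD "" else mt0
    PySem.Str.lower mt1 == "user"

-- A's loop: idx counter = enumerate; state (turns, current) threaded as arguments
def pvGoA (idx : Int) (turns : List (List Int)) (current : List Int) :
    List (List (String × String)) → List (List Int)
  | [] => if current ≠ [] then turns ++ [current] else turns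
  | it :: rest =>
    if pv_is_user it then
      pvGoA (idx + 1) (if current ≠ [] then turns ++ [current] else turns) [idx] rest
    else
      pvGoA (idx + 1) turns (current ++ [idx]) rest

def group_by_turns_py (items : List (List (String × String))) : List (List Int) :=
  pvGoA 0 [] [] items

-- ===== PORT B =====
def group_by_turns_py_alt (items : List (List (String × String))) : List (List Int) :=
  let n : Int := PySem.List.len items
  let anchors : List Int :=
    ((PySem.List.enumerate items 0).filter (fun p => pv_is_user p.2)).map (·.1)
  match anchors with
  | [] => if items.length ≠ 0 then [PySem.List.pyRange 0 n 1] else []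
  | a :: _ =>
    let bounds : List Int := (if a > 0 then [(0 : Int)] else []) ++ anchors ++ [n]
    (bounds.zip bounds.tail).map (fun p => PySem.List.pyRange p.1 p.2 1)

-- ===== PRECONDITION & SPEC =====
def Spec_group_by_turns_py (items : List (List (String × String))) (out : List (List Int)) : Prop := out = group_by_turns_py_alt items
instance (items : List (List (String × String))) (out : List (List Int)) : Decidable (Spec_group_by_turns_py items out) := by unfold Spec_group_by_turns_py; infer_instance

-- ===== CLAIM (what is proved, stated in full; the proofs are below) =====
def Claim_equal_group_by_turns_py : Prop := ∀ (items : List (List (String × String))), Dom_group_by_turns_py items → Spec_group_by_turns_py items (group_by_turns_py items)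

-- ===== LEMMAS AND PROOFS =====

-- pvG cur k l = the turns A still produces from suffix l at index k with current = cur
def pvG (cur : List Int) (k : Int) : List (List (String × String)) → List (List Int)
  | [] => if cur ≠ [] then [cur] else []
  | it :: rest =>
    if pv_is_user it then (if cur ≠ [] then [cur] else []) ++ pvG [k] (k + 1) rest
    else pvG (cur ++ [k]) (k + 1) rest

-- user-anchor indices of suffix l starting at index k
def pvAnch (k : Int) : List (List (String × String)) → List Int
  | [] => []
  | it :: rest => if pv_is_user it then k :: pvAnch (k + 1) rest else pvAnch (k + 1) rest

-- turns as ranges between boundaries, recursively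
def pvSegs (s : Int) : List Int → Int → List (List Int)
  | [], e => if s < e then [PySem.List.pyRange s e 1] else []
  | b :: rest, e => (if s < b then [PySem.List.pyRange s b 1] else []) ++ pvSegs b rest e

def pvBuild (bounds : List Int) : List (List Int) :=
  (bounds.zip bounds.tail).map (fun p => PySem.List.pyRange p.1 p.2 1)

theorem pvGoA_eq (l : List (List (String × String))) :
    ∀ (k : Int) (turns : List (List Int)) (cur : List Int),
      pvGoA k turns cur l = turns ++ pvG cur k l := by
  induction l with
  | nil => intro k turns cur; by_cases h : cur = [] <;> simp [pvGoA, pvG, h]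
  | cons it rest ih =>
    intro k turns cur
    by_cases hu : pv_is_user it
    · by_cases h : cur = [] <;> simp [pvGoA, pvG, hu, h, ih, List.append_assoc]
    · simp [pvGoA, pvG, hu, ih]

theorem pvAnch_eq (l : List (List (String × String))) :
    ∀ (k : Int),
      ((PySem.List.enumerate l k).filter (fun p => pv_is_user p.2)).map (·.1) = pvAnch k l := by
  induction l with
  | nil => intro k; simp [PySem.List.enumerate_nil, pvAnch]
  | cons it rest ih =>
    intro k
    by_cases hu : pv_is_user it <;>
      simp [PySem.List.enumerate_cons, pvAnch, hu, ih]

theorem pvRange_ne_nil {a b : Int} (h : a < b) : PySem.List.pyRange a b 1 ≠ [] := by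
  rw [PySem.List.pyRange_one_cons h]; simp

theorem pvMain (l : List (List (String × String))) :
    ∀ (a k : Int), a ≤ k →
      pvG (PySem.List.pyRange a k 1) k l = pvSegs a (pvAnch k l) (k + l.length) := by
  induction l with
  | nil =>
    intro a k hak
    by_cases h : a < k
    · simp [pvG, pvAnch, pvSegs, pvRange_ne_nil h, h]
    · have hk : k ≤ a := by omega
      simp [pvG, pvAnch, pvSegs, PySem.List.pyRange_one_eq_nil hk, h]
  | cons it rest ih =>
    intro a k hak
    have hE : k + ((it :: rest).length : Int) = (k + 1) + (rest.length : Int) := by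
      simp only [List.length_cons]; push_cast; ring
    by_cases hu : pv_is_user it
    · have h1 : pvG [k] (k + 1) rest = pvSegs k (pvAnch (k + 1) rest) (k + 1 + rest.length) := by
        have := ih k (k + 1) (by omega)
        rwa [PySem.List.pyRange_one_cons (by omega : k < k + 1),
             PySem.List.pyRange_one_eq_nil (le_refl (k + 1))] at this
      rw [pvG, pvAnch, if_pos hu, if_pos hu, hE, h1, pvSegs]
      by_cases h : a < k
      · rw [if_pos h, if_pos (pvRange_ne_nil h)]
      · rw [if_neg h, if_neg (by simp [PySem.List.pyRange_one_eq_nil (by omega : k ≤ a)])]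
    · have hcur : PySem.List.pyRange a k 1 ++ [k] = PySem.List.pyRange a (k + 1) 1 :=
        (PySem.List.pyRange_one_succ_right hak).symm
      rw [pvG, pvAnch, if_neg hu, if_neg hu, hE, hcur, ih a (k + 1) (by omega)]

-- strictly ascending from a strict lower bound (proof-side glue predicate)
def pvAsc : Int → List Int → Prop
  | _, [] => True
  | b, c :: t => b < c ∧ pvAsc c t

theorem pvChain (l : List (List (String × String))) :
    ∀ (k b : Int), b < k → pvAsc b (pvAnch k l ++ [k + l.length]) := by
  induction l with
  | nil => intro k b hb; simpa [pvAnch, pvAsc] using hb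
  | cons it rest ih =>
    intro k b hb
    have hE : (k + 1 : Int) + (rest.length : Int) = k + ((it :: rest).length : Int) := by
      simp only [List.length_cons]; push_cast; ring
    by_cases hu : pv_is_user it
    · show pvAsc b ((if pv_is_user it then k :: pvAnch (k + 1) rest else pvAnch (k + 1) rest) ++ _)
      rw [if_pos hu]
      refine ⟨hb, ?_⟩
      have h := ih (k + 1) k (by omega)
      rwa [hE] at h
    · show pvAsc b ((if pv_is_user it then k :: pvAnch (k + 1) rest else pvAnch (k + 1) rest) ++ _)
      rw [if_neg hu]
      have h := ih (k + 1) b (by omega)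
      rwa [hE] at h

theorem pvBuild_cons (x y : Int) (zs : List Int) :
    pvBuild (x :: y :: zs) = PySem.List.pyRange x y 1 :: pvBuild (y :: zs) := by
  simp [pvBuild]

theorem pvSegs_build (tail : List Int) :
    ∀ (b e : Int), pvAsc b (tail ++ [e]) → pvSegs b tail e = pvBuild (b :: tail ++ [e]) := by
  induction tail with
  | nil =>
    intro b e hc
    obtain ⟨hbe, -⟩ := hc
    simp [pvSegs, pvBuild, hbe]
  | cons c t ih =>
    intro b e hc
    obtain ⟨hbc, hrest⟩ := hc
    show (if b < c then [PySem.List.pyRange b c 1] else []) ++ pvSegs c t e = _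
    rw [if_pos hbc, ih c e hrest]
    simp [pvBuild_cons]

theorem pvAlt_eq_segs (items : List (List (String × String))) :
    group_by_turns_py_alt items = pvSegs 0 (pvAnch 0 items) items.length := by
  have hch : pvAsc (-1) (pvAnch 0 items ++ [(0 : Int) + items.length]) :=
    pvChain items 0 (-1) (by omega)
  rw [zero_add] at hch
  unfold group_by_turns_py_alt
  rw [pvAnch_eq items 0]
  cases h : pvAnch 0 items with
  | nil =>
    rw [h] at hch
    by_cases hn : items.length = 0
    · simp [pvSegs, hn]
    · have hpos : (0 : Int) < items.length := by omega
      simp [pvSegs, hn]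
  | cons a rest =>
    rw [h] at hch
    obtain ⟨ha, hrest⟩ := hch
    have hsegs : pvSegs a rest (items.length : Int) = pvBuild (a :: rest ++ [(items.length : Int)]) :=
      pvSegs_build rest a _ hrest
    show _ = pvSegs 0 (a :: rest) (items.length : Int)
    show ((((if a > 0 then [(0 : Int)] else []) ++ (a :: rest) ++ [(PySem.List.len items)]).zip
            ((if a > 0 then [(0 : Int)] else []) ++ (a :: rest) ++ [(PySem.List.len items)]).tail).map
          (fun p => PySem.List.pyRange p.1 p.2 1)) = _
    rw [PySem.List.len_eq]
    show pvBuild ((if a > 0 then [(0 : Int)] else []) ++ (a :: rest) ++ [(items.length : Int)]) = _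
    show _ = (if (0 : Int) < a then [PySem.List.pyRange 0 a 1] else []) ++ pvSegs a rest (items.length : Int)
    rw [hsegs]
    by_cases hpos : a > 0
    · rw [if_pos hpos, if_pos (show (0 : Int) < a from hpos)]
      show pvBuild ((0 : Int) :: a :: (rest ++ [(items.length : Int)])) = _
      rw [pvBuild_cons]
      simp
    · rw [if_neg hpos, if_neg (show ¬ (0 : Int) < a from hpos)]
      simp

-- ===== VERDICT (by name: the statement is the Claim_ definition above) =====
theorem group_by_turns_py_spec : Claim_equal_group_by_turns_py := by
  intro items _
  show group_by_turns_py items = group_by_turns_py_alt items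
  unfold group_by_turns_py
  rw [pvGoA_eq items 0 [] []]
  have h0 : ([] : List Int) = PySem.List.pyRange 0 0 1 :=
    (PySem.List.pyRange_one_eq_nil (le_refl 0)).symm
  rw [List.nil_append, h0, pvMain items 0 0 (le_refl 0), zero_add, pvAlt_eq_segs]
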